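-- pv_equiv track=rewrite | github.com/parv-jain/programs | sorted_arrays.py | solve
-- ===== SOURCE A (Python) =====
-- def solve (A, N, K):
--     # Write your code here
--     A = list(A)
--     r = 1
--     n = N
--     mapping = {}
--     totalElements = 0
--     while N>0:
--         for e in A[0:N]:
--             if e in mapping.keys():
--                 mapping[e] += (r*n)
--             else:
--                 mapping[e] = (r*n)
--             totalElements += (r*n)
--         N=N//2
--         r+=1
--
--     if K > totalElements:
--         return -1
--
--     till = 0
--     for key in sorted(mapping):
--         till += mapping[key]
--         if K <= till:
--             return key
-- ===== SOURCE B (Python) =====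
-- def solve(A, N, K):
--     # Per-index closed form: index i is covered by the first t halving rounds,
--     # where t = number of values in the chain N, N//2, N//4, ... that exceed i,
--     # i.e. t = (N // (i + 1)).bit_length(); its total weight is N * t * (t + 1) // 2.
--     weights = {}
--     total = 0
--     if N > 0:
--         for i, e in enumerate(A[:N]):
--             t = (N // (i + 1)).bit_length()
--             w = N * t * (t + 1) // 2
--             weights[e] = weights.get(e, 0) + w
--             total += w
--     if K > total:
--         return -1
--     till = 0
--     for key in sorted(weights):
--         till += weights[key]
--         if K <= till:
--             return key
--     return -1
-- ===== Notes on version B (the rewrite author's own statement) =====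
-- stated objective: alternative
-- what changed: A re-scans the shrinking prefix A[0:N], A[0:N//2], ... once per halving round, re-updating the dict on every visit; B makes a single pass over A[:N], computing for each index i the number of covering rounds in closed form as t = (N // (i+1)).bit_length() and adding the index's total weight N*t*(t+1)//2 to the dict once, then does the same sorted cumulative scan.
-- outside the precondition, e.g. on solve([], 0, 0): A returns None, B returns -1
import Mathlib
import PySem

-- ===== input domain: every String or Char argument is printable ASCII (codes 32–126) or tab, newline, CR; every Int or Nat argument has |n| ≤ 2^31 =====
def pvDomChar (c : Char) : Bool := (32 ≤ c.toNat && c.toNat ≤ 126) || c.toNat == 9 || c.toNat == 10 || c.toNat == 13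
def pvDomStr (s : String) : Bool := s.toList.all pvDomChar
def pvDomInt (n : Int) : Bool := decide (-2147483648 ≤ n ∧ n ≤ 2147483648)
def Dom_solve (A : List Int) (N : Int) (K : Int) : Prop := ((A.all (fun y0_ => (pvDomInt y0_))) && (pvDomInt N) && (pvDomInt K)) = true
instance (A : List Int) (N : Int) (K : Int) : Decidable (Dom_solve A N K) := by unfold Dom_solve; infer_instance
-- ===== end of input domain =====

-- B replaces A's rounds-outer/elements-inner re-accumulation by a single pass over the
-- first N elements, adding each index's total weight in closed form (objective: alternative).

-- ===== PORT A =====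
-- body of 'for e in A[0:N]': update mapping (first branch: e already a key) and totalElements
def solveStepA (n r : Int) (st : PySem.Dict Int Int × Int) (e : Int) : PySem.Dict Int Int × Int :=
  (if (st.1.get? e).isSome then st.1.insert e (st.1.getD e 0 + r * n)
   else st.1.insert e (r * n),
   st.2 + r * n)

-- the 'while N > 0' loop, carrying (mapping, totalElements)
def solveLoopA (A : List Int) (n N r : Int) (mp : PySem.Dict Int Int) (tot : Int) :
    PySem.Dict Int Int × Int :=
  if h : 0 < N then
    let st := (PySem.List.slice A (some 0) (some N)).foldl (solveStepA n r) (mp, tot)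
    solveLoopA A n (PySem.Int.floordiv N 2) (r + 1) st.1 st.2
  else (mp, tot)
termination_by N.toNat
decreasing_by
  have h2 : PySem.Int.floordiv N 2 = N / 2 := PySem.Int.floordiv_eq_ediv_of_pos (by omega)
  have h3 : N / 2 < N := by omega
  have h4 : 0 ≤ N / 2 := Int.ediv_nonneg (le_of_lt h) (by omega)
  omega

-- the 'for key in sorted(mapping)' scan; the Python falls through (returning None)
-- only when the mapping is empty and K ≤ 0 — outside Pre_solve; the port returns -1 there
def solveScanA (mp : PySem.Dict Int Int) (K : Int) : List Int → Int → Int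
  | [], _ => -1
  | k :: rest, till =>
      let till' := till + mp.getD k 0
      if K ≤ till' then k else solveScanA mp K rest till'

def solve (A : List Int) (N : Int) (K : Int) : Int :=
  let st := solveLoopA A N N 1 PySem.Dict.empty 0
  if st.2 < K then -1
  else solveScanA st.1 K (PySem.List.sorted st.1.keys (fun x => x) false) 0

-- ===== PORT B =====
-- body of 'for i, e in enumerate(A[:N])': t = (N // (i+1)).bit_length(), w = N*t*(t+1)//2
def solveStepB (N : Int) (st : PySem.Dict Int Int × Int) (p : Int × Int) : PySem.Dict Int Int × Int :=
  let t : Int := (PySem.Int.bitLength (PySem.Int.floordiv N (p.1 + 1)) : Int)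
  let w : Int := PySem.Int.floordiv (N * t * (t + 1)) 2
  (st.1.insert p.2 (st.1.getD p.2 0 + w), st.2 + w)

-- the 'for key in sorted(weights)' scan of Source B, with its final 'return -1'
def solveScanB (mp : PySem.Dict Int Int) (K : Int) : List Int → Int → Int
  | [], _ => -1
  | k :: rest, till =>
      let till' := till + mp.getD k 0
      if K ≤ till' then k else solveScanB mp K rest till'

def solve_alt (A : List Int) (N : Int) (K : Int) : Int :=
  let st :=
    if 0 < N then
      (PySem.List.enumerate (PySem.List.slice A none (some N)) 0).foldl
        (solveStepB N) (PySem.Dict.empty, 0)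
    else (PySem.Dict.empty, 0)
  if st.2 < K then -1
  else solveScanB st.1 K (PySem.List.sorted st.1.keys (fun x => x) false) 0

-- ===== PRECONDITION & SPEC =====
-- Pre_ excludes exactly the inputs (K ≤ 0 with an empty weight map, i.e. N < 1 or A = [])
-- on which the Python A falls off the end and returns None instead of an int.
def Pre_solve (A : List Int) (N : Int) (K : Int) : Prop := 1 ≤ K ∨ (1 ≤ N ∧ A ≠ [])
instance (A : List Int) (N : Int) (K : Int) : Decidable (Pre_solve A N K) := by unfold Pre_solve; infer_instance

def pvWitness_solve : List Int × Int × Int := ([3, 1, 2], 3, 5)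

def Spec_solve (A : List Int) (N : Int) (K : Int) (out : Int) : Prop := out = solve_alt A N K
instance (A : List Int) (N : Int) (K : Int) (out : Int) : Decidable (Spec_solve A N K out) := by unfold Spec_solve; infer_instance

-- ===== CLAIM (what is proved, stated in full; the proofs are below) =====
def Claim_equal_solve : Prop := ∀ (A : List Int) (N : Int) (K : Int), Dom_solve A N K → Pre_solve A N K → Spec_solve A N K (solve A N K)

-- ===== LEMMAS AND PROOFS =====

-- number of halving rounds whose slice still covers index i
def tcount (N : Int) (i : Nat) : Nat :=
  if h : (i : Int) < N then tcount (PySem.Int.floordiv N 2) i + 1 else 0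
termination_by N.toNat
decreasing_by
  have h2 : PySem.Int.floordiv N 2 = N / 2 := PySem.Int.floordiv_eq_ediv_of_pos (by omega)
  have h3 : N / 2 < N := by omega
  have h4 : 0 ≤ N / 2 := Int.ediv_nonneg (by omega) (by omega)
  omega

-- gsum r t = r + (r+1) + … + (r+t-1)
def gsum (r : Int) (t : Nat) : Int :=
  match t with
  | 0 => 0
  | t' + 1 => r + gsum (r + 1) t'

-- B's per-index weight
def wB (N x : Int) : Int :=
  PySem.Int.floordiv
    (N * (PySem.Int.bitLength (PySem.Int.floordiv N (x + 1)) : Int) *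
      ((PySem.Int.bitLength (PySem.Int.floordiv N (x + 1)) : Int) + 1)) 2

lemma tcount_pos {N : Int} {i : Nat} (h : (i : Int) < N) :
    tcount N i = tcount (PySem.Int.floordiv N 2) i + 1 := by
  rw [tcount]; simp [h]

lemma tcount_nonpos {N : Int} {i : Nat} (h : N ≤ (i : Int)) : tcount N i = 0 := by
  rw [tcount]; simp; omega

lemma gsum_two_mul (t : Nat) : ∀ r : Int, 2 * gsum r t = (2 * r + t - 1) * t := by
  induction t with
  | zero => intro r; simp [gsum]
  | succ t ih =>
      intro r
      have h := ih (r + 1)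
      simp only [gsum]
      push_cast at h ⊢
      nlinarith [h]

lemma floordiv_swap (N : Int) (_hN : 0 ≤ N) (i : Nat) :
    PySem.Int.floordiv (PySem.Int.floordiv N ((i : Int) + 1)) 2
      = PySem.Int.floordiv (PySem.Int.floordiv N 2) ((i : Int) + 1) := by
  have hi : (0:Int) < (i : Int) + 1 := by omega
  rw [PySem.Int.floordiv_eq_ediv_of_pos hi, PySem.Int.floordiv_eq_ediv_of_pos (by omega : (0:Int) < 2),
      PySem.Int.floordiv_eq_ediv_of_pos (by omega : (0:Int) < 2), PySem.Int.floordiv_eq_ediv_of_pos hi,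
      Int.ediv_ediv_of_nonneg (by omega), Int.ediv_ediv_of_nonneg (by omega), Int.mul_comm]

lemma tcount_eq_bitLength_aux (i : Nat) :
    ∀ (k : Nat) (N : Int), N.toNat = k → 0 ≤ N →
      tcount N i = PySem.Int.bitLength (PySem.Int.floordiv N ((i : Int) + 1)) := by
  intro k
  induction k using Nat.strong_induction_on with
  | _ k ih =>
      intro N hk hN
      by_cases h : (i : Int) < N
      · have hfd : PySem.Int.floordiv N 2 = N / 2 :=
          PySem.Int.floordiv_eq_ediv_of_pos (by omega)
        have hN2 : 0 ≤ PySem.Int.floordiv N 2 := by rw [hfd]; omega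
        have hlt : (PySem.Int.floordiv N 2).toNat < k := by rw [hfd]; omega
        have hq : 1 ≤ PySem.Int.floordiv N ((i : Int) + 1) := by
          rw [PySem.Int.le_floordiv_iff_mul_le (by omega : (0:Int) < (i : Int) + 1)]
          omega
        rw [tcount_pos h, ih _ hlt _ rfl hN2,
            PySem.Int.bitLength_of_pos (by omega : 0 < PySem.Int.floordiv N ((i : Int) + 1)),
            floordiv_swap N hN i]
      · have h0 : PySem.Int.floordiv N ((i : Int) + 1) = 0 := by
          rw [PySem.Int.floordiv_eq_iff_of_pos (by omega : (0:Int) < (i : Int) + 1)]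
          omega
        rw [tcount_nonpos (by omega), h0, PySem.Int.bitLength_zero]

lemma tcount_eq_bitLength (N : Int) (i : Nat) (hN : 0 ≤ N) :
    tcount N i = PySem.Int.bitLength (PySem.Int.floordiv N ((i : Int) + 1)) :=
  tcount_eq_bitLength_aux i N.toNat N rfl hN

lemma wB_eq (N : Int) (hN : 0 ≤ N) (i : Nat) :
    wB N (i : Int) = N * gsum 1 (tcount N i) := by
  rw [wB, ← tcount_eq_bitLength N i hN]
  have h2 : 2 * gsum 1 (tcount N i) = ((tcount N i : Int) + 1) * (tcount N i : Int) := by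
    have := gsum_two_mul (tcount N i) 1
    linarith
  have h3 : N * (tcount N i : Int) * ((tcount N i : Int) + 1) = N * gsum 1 (tcount N i) * 2 := by
    nlinarith [h2]
  rw [h3, PySem.Int.floordiv_eq_ediv_of_pos (by omega : (0:Int) < 2)]
  exact Int.mul_ediv_cancel _ (by omega)

-- first branch of stepA collapses: both branches insert getD + r*n
lemma stepA_eq (n r : Int) (st : PySem.Dict Int Int × Int) (e : Int) :
    solveStepA n r st e = (st.1.insert e (st.1.getD e 0 + r * n), st.2 + r * n) := by
  unfold solveStepA
  by_cases h : (st.1.get? e).isSome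
  · simp [h]
  · have hn : st.1.get? e = none := Option.not_isSome_iff_eq_none.mp (by simpa using h)
    simp [h, PySem.Dict.getD_of_get?_eq_none st.1 (0:Int) hn]

lemma stepB_eq (N : Int) (st : PySem.Dict Int Int × Int) (p : Int × Int) :
    solveStepB N st p = (st.1.insert p.2 (st.1.getD p.2 0 + wB N p.1), st.2 + wB N p.1) := rfl

-- generic: getD after an insert-accumulate fold
lemma getD_foldl_insert_add {α : Type} (key : α → Int) (f : α → Int) :
    ∀ (l : List α) (d : PySem.Dict Int Int) (v : Int),
      (l.foldl (fun d x => d.insert (key x) (d.getD (key x) 0 + f x)) d).getD v 0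
        = d.getD v 0 + ((l.filter (fun x => key x == v)).map f).sum := by
  intro l
  induction l with
  | nil => intro d v; simp
  | cons x l ih =>
      intro d v
      simp only [List.foldl_cons, List.filter_cons]
      by_cases h : key x = v
      · subst h
        simp only [beq_self_eq_true, if_true, List.map_cons, List.sum_cons]
        rw [ih, PySem.Dict.getD_insert]
        split_ifs with hv
        · ring
        · simp at hv
      · have hb : (key x == v) = false := by simp [h]
        simp only [hb, Bool.false_eq_true, if_neg, not_false_iff]
        rw [ih, PySem.Dict.getD_insert, if_neg (fun hv => h (hv.symm))]

-- filtered constant sum over a list as a range sum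
lemma filter_const_sum (v c : Int) :
    ∀ l : List Int,
      ((l.filter (fun x => x == v)).map (fun _ => c)).sum
        = ∑ j ∈ Finset.range l.length, if l[j]? = some v then c else 0 := by
  intro l
  induction l with
  | nil => simp
  | cons x l ih =>
      simp only [List.length_cons, Finset.sum_range_succ' _ l.length]
      simp only [List.getElem?_cons_succ, List.getElem?_cons_zero, List.filter_cons]
      by_cases h : x = v
      · subst h
        simp only [beq_self_eq_true, if_true, List.map_cons, List.sum_cons, ih]
        ring
      · have hb : (x == v) = false := by simp [h]
        have hx : ((some x : Option Int) = some v) = False := by simp [h]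
        simp only [hb, Bool.false_eq_true, if_neg, not_false_iff, ih, hx, add_zero]
        rfl

-- filtered weight sum over an enumerate as a range sum
lemma enum_filter_sum (g : Int → Int) (v : Int) :
    ∀ (l : List Int) (s : Int),
      (((PySem.List.enumerate l s).filter (fun p => p.2 == v)).map (fun p => g p.1)).sum
        = ∑ j ∈ Finset.range l.length, if l[j]? = some v then g (s + j) else 0 := by
  intro l
  induction l with
  | nil => intro s; simp [PySem.List.enumerate_nil]
  | cons x l ih =>
      intro s
      have hshift : (∑ j ∈ Finset.range l.length,
            if l[j]? = some v then g ((s + 1) + (j : Int)) else 0)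
          = ∑ j ∈ Finset.range l.length,
              if l[j]? = some v then g (s + ((j : Int) + 1)) else 0 :=
        Finset.sum_congr rfl (fun j _ => by
          rw [show (s + 1) + (j : Int) = s + ((j : Int) + 1) by ring])
      rw [PySem.List.enumerate_cons]
      simp only [List.length_cons, Finset.sum_range_succ' _ l.length,
        List.getElem?_cons_succ, List.getElem?_cons_zero, List.filter_cons]
      push_cast
      by_cases h : x = v
      · subst h
        simp only [beq_self_eq_true, if_true, List.map_cons, List.sum_cons]
        rw [ih (s + 1), hshift]
        simp [add_comm]
      · have hb : (x == v) = false := by simp [h]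
        simp only [hb, Bool.false_eq_true, if_neg, not_false_iff]
        rw [ih (s + 1), hshift]
        simp [h]

-- plain weight sum over an enumerate as a range sum
lemma enum_map_sum (g : Int → Int) :
    ∀ (l : List Int) (s : Int),
      (((PySem.List.enumerate l s).map (fun p => g p.1)).sum)
        = ∑ j ∈ Finset.range l.length, g (s + j) := by
  intro l
  induction l with
  | nil => intro s; simp [PySem.List.enumerate_nil]
  | cons x l ih =>
      intro s
      have hshift : (∑ j ∈ Finset.range l.length, g ((s + 1) + (j : Int)))
          = ∑ j ∈ Finset.range l.length, g (s + ((j : Int) + 1)) :=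
        Finset.sum_congr rfl (fun j _ => by
          rw [show (s + 1) + (j : Int) = s + ((j : Int) + 1) by ring])
      rw [PySem.List.enumerate_cons]
      simp only [List.length_cons, Finset.sum_range_succ' _ l.length, List.map_cons,
        List.sum_cons]
      push_cast
      rw [ih (s + 1), hshift]
      simp [add_comm]

-- the core interchange-of-summation identity, per round
lemma sum_split_gen (len : Nat) (c : Nat → Int) (n N r : Int) (hN : 0 < N) :
    ∑ j ∈ Finset.range (min N.toNat len), c j * (n * gsum r (tcount N j))
      = (∑ j ∈ Finset.range (min N.toNat len), c j * (n * r))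
        + ∑ j ∈ Finset.range (min (PySem.Int.floordiv N 2).toNat len),
            c j * (n * gsum (r + 1) (tcount (PySem.Int.floordiv N 2) j)) := by
  have hfd : PySem.Int.floordiv N 2 = N / 2 := PySem.Int.floordiv_eq_ediv_of_pos (by omega)
  set N2 := PySem.Int.floordiv N 2 with hN2def
  have hN2 : 0 ≤ N2 := by rw [hfd]; omega
  have hle : N2 ≤ N := by rw [hfd]; omega
  set m := min N.toNat len with hm
  set m' := min N2.toNat len with hm'
  have hmm : m' ≤ m := by
    have : N2.toNat ≤ N.toNat := by omega
    omega
  -- split the big sum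
  rw [← Finset.sum_range_add_sum_Ico _ hmm,
      ← Finset.sum_range_add_sum_Ico (fun j => c j * (n * r)) hmm]
  have hlow : ∀ j ∈ Finset.range m',
      c j * (n * gsum r (tcount N j))
        = c j * (n * r) + c j * (n * gsum (r + 1) (tcount N2 j)) := by
    intro j hj
    simp only [Finset.mem_range] at hj
    have hjN : (j : Int) < N := by
      have h1 : j < N2.toNat := by omega
      have : (j : Int) < N2 := by omega
      omega
    rw [tcount_pos hjN, ← hN2def]
    simp only [gsum]
    ring
  have hhigh : ∀ j ∈ Finset.Ico m' m,
      c j * (n * gsum r (tcount N j)) = c j * (n * r) := by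
    intro j hj
    simp only [Finset.mem_Ico] at hj
    have hjN : (j : Int) < N := by
      have : j < N.toNat := by omega
      omega
    have hjN2 : N2 ≤ (j : Int) := by
      have hjlen : j < len := by omega
      have : N2.toNat ≤ j := by omega
      omega
    rw [tcount_pos hjN, ← hN2def, tcount_nonpos hjN2]
    simp only [gsum]
    ring
  rw [Finset.sum_congr rfl hlow, Finset.sum_congr rfl hhigh, Finset.sum_add_distrib]
  ring

-- what the whole 'while' loop computes: keys, every value, and the running total
-- (if P then x else 0) as an indicator times x
lemma ite_mul_form (P : Prop) [Decidable P] (x : Int) :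
    (if P then x else 0) = (if P then (1:Int) else 0) * x := by
  split_ifs <;> ring

lemma set_add_of_mem {s : PySem.Set Int} {x : Int} (h : x ∈ s) : s.add x = s := by
  simp [PySem.Set.add, PySem.Set.contains, h]

lemma set_update_absorb : ∀ (l : List Int) (s : PySem.Set Int),
    (∀ x ∈ l, x ∈ s) → PySem.Set.update s l = s := by
  intro l
  induction l with
  | nil => intro s _; rfl
  | cons x l ih =>
      intro s h
      have hstep : PySem.Set.update s (x :: l) = PySem.Set.update (s.add x) l := rfl
      rw [hstep, set_add_of_mem (h x (by simp))]
      exact ih s (fun y hy => h y (by simp [hy]))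

lemma loopA_spec (A : List Int) (n : Int) :
    ∀ (N r : Int) (mp : PySem.Dict Int Int) (tot : Int),
      ((solveLoopA A n N r mp tot).1.keys
          = PySem.Set.update mp.keys (if 0 < N then A.take N.toNat else []))
      ∧ (∀ v, (solveLoopA A n N r mp tot).1.getD v 0
          = mp.getD v 0 + ∑ j ∈ Finset.range (min N.toNat A.length),
              (if A[j]? = some v then n * gsum r (tcount N j) else 0))
      ∧ (solveLoopA A n N r mp tot).2
          = tot + ∑ j ∈ Finset.range (min N.toNat A.length), n * gsum r (tcount N j) := by
  have main : ∀ (k : Nat) (N : Int), N.toNat = k → ∀ (r : Int) (mp : PySem.Dict Int Int) (tot : Int),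
      ((solveLoopA A n N r mp tot).1.keys
          = PySem.Set.update mp.keys (if 0 < N then A.take N.toNat else []))
      ∧ (∀ v, (solveLoopA A n N r mp tot).1.getD v 0
          = mp.getD v 0 + ∑ j ∈ Finset.range (min N.toNat A.length),
              (if A[j]? = some v then n * gsum r (tcount N j) else 0))
      ∧ (solveLoopA A n N r mp tot).2
          = tot + ∑ j ∈ Finset.range (min N.toNat A.length), n * gsum r (tcount N j) := by
    intro k
    induction k using Nat.strong_induction_on with
    | _ k ih =>
      intro N hk r mp tot
      by_cases h : 0 < N
      · have hN0 : 0 ≤ N := le_of_lt h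
        have hfd : PySem.Int.floordiv N 2 = N / 2 := PySem.Int.floordiv_eq_ediv_of_pos (by omega)
        set N2 := PySem.Int.floordiv N 2 with hN2def
        have hN20 : 0 ≤ N2 := by rw [hfd]; omega
        have hlt : N2.toNat < k := by rw [hfd]; omega
        have hle : N2.toNat ≤ N.toNat := by rw [hfd]; omega
        set m := min N.toNat A.length with hm
        set m2 := min N2.toNat A.length with hm2
        set mp' := (A.take N.toNat).foldl (fun d e => d.insert e (d.getD e 0 + r * n)) mp with hmp'
        have hslice : PySem.List.slice A (some 0) (some N) = A.take N.toNat := by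
          rw [PySem.List.slice_zero_start, PySem.List.slice_to A hN0]
        have hfun : solveStepA n r = fun (st : PySem.Dict Int Int × Int) (e : Int) =>
            (st.1.insert e (st.1.getD e 0 + r * n), st.2 + r * n) :=
          funext fun st => funext fun e => stepA_eq n r st e
        have hunfold : solveLoopA A n N r mp tot
            = solveLoopA A n N2 (r + 1) mp'
                (tot + ((A.take N.toNat).map (fun _ => r * n)).sum) := by
          conv_lhs => rw [solveLoopA]
          simp only [dif_pos h, hslice, hfun, hN2def,
            PySem.List.foldl_prod_mk
              (f := fun (d : PySem.Dict Int Int) (e : Int) => d.insert e (d.getD e 0 + r * n))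
              (g := fun (acc : Int) (e : Int) => acc + r * n),
            PySem.List.foldl_add (g := fun _ : Int => r * n), hmp']
        obtain ⟨ihk, ihg, iht⟩ := ih N2.toNat hlt N2 rfl (r + 1) mp'
          (tot + ((A.take N.toNat).map (fun _ => r * n)).sum)
        -- inner-fold facts
        have hK : mp'.keys = PySem.Set.update mp.keys (A.take N.toNat) :=
          PySem.Dict.keys_foldl_insert (A.take N.toNat) (fun d e => d.getD e 0 + r * n) mp
        have hlentake : (A.take N.toNat).length = m := by rw [List.length_take]
        have hG : ∀ v, mp'.getD v 0 = mp.getD v 0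
            + ∑ j ∈ Finset.range m, (if A[j]? = some v then n * r else 0) := by
          intro v
          have hg := getD_foldl_insert_add (fun x : Int => x) (fun _ : Int => r * n)
            (A.take N.toNat) mp v
          simp only [] at hg
          rw [filter_const_sum v (r * n) (A.take N.toNat), hlentake] at hg
          rw [hmp', hg]
          exact congrArg _ (Finset.sum_congr rfl fun j hj => by
            simp only [Finset.mem_range, hm] at hj
            rw [List.getElem?_take_of_lt (by omega : j < N.toNat), mul_comm r n])
        -- the interchange identity, getD form
        have hsplit : ∀ v, (∑ j ∈ Finset.range m, if A[j]? = some v then n * gsum r (tcount N j) else 0)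
            = (∑ j ∈ Finset.range m, if A[j]? = some v then n * r else 0)
              + ∑ j ∈ Finset.range m2, if A[j]? = some v then n * gsum (r + 1) (tcount N2 j) else 0 := by
          intro v
          have e1 := sum_split_gen A.length (fun j => if A[j]? = some v then (1:Int) else 0) n N r h
          rw [← hN2def, ← hm, ← hm2] at e1
          calc (∑ j ∈ Finset.range m, if A[j]? = some v then n * gsum r (tcount N j) else 0)
              = ∑ j ∈ Finset.range m, (if A[j]? = some v then (1:Int) else 0) * (n * gsum r (tcount N j)) :=
                Finset.sum_congr rfl fun j _ => ite_mul_form _ _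
            _ = (∑ j ∈ Finset.range m, (if A[j]? = some v then (1:Int) else 0) * (n * r))
                  + ∑ j ∈ Finset.range m2, (if A[j]? = some v then (1:Int) else 0) * (n * gsum (r + 1) (tcount N2 j)) := e1
            _ = (∑ j ∈ Finset.range m, if A[j]? = some v then n * r else 0)
                  + ∑ j ∈ Finset.range m2, if A[j]? = some v then n * gsum (r + 1) (tcount N2 j) else 0 := by
                rw [Finset.sum_congr rfl fun j _ => (ite_mul_form (A[j]? = some v) (n * r)).symm,
                    Finset.sum_congr rfl fun j _ =>
                      (ite_mul_form (A[j]? = some v) (n * gsum (r + 1) (tcount N2 j))).symm]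
        have hsplit1 : (∑ j ∈ Finset.range m, n * gsum r (tcount N j))
            = (m : Int) * (n * r) + ∑ j ∈ Finset.range m2, n * gsum (r + 1) (tcount N2 j) := by
          have e1 := sum_split_gen A.length (fun _ => (1:Int)) n N r h
          rw [← hN2def, ← hm, ← hm2] at e1
          simp only [one_mul] at e1
          rw [e1, Finset.sum_const, Finset.card_range, nsmul_eq_mul]
        refine ⟨?_, ?_, ?_⟩
        · rw [hunfold, ihk, if_pos h]
          by_cases h2 : 0 < N2
          · rw [if_pos h2, hK]
            apply set_update_absorb
            intro x hx
            have hsub : A.take N2.toNat ⊆ A.take N.toNat := by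
              rw [show A.take N2.toNat = (A.take N.toNat).take N2.toNat by
                rw [List.take_take, min_eq_left hle]]
              exact List.take_subset _ _
            exact (PySem.Set.mem_update _ _ x).mpr (Or.inr (hsub hx))
          · rw [if_neg h2]
            exact hK
        · intro v
          rw [hunfold, ihg v, hG v, hsplit v]
          ring
        · rw [hunfold, iht, PySem.List.sum_map_const_int, hlentake, hsplit1]
          ring
      · have ht0 : N.toNat = 0 := by omega
        refine ⟨?_, fun v => ?_, ?_⟩ <;>
          · rw [solveLoopA, dif_neg h]
            simp [h, ht0]
  intro N r mp tot
  exact main N.toNat N rfl r mp tot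

-- the fold of Source B over enumerate(A[:N]): keys, every value, and the running total
lemma foldB_spec (N : Int) (l : List Int) (d : PySem.Dict Int Int) (tot : Int) :
    (((PySem.List.enumerate l 0).foldl (solveStepB N) (d, tot)).1.keys
        = PySem.Set.update d.keys l)
    ∧ (∀ v, ((PySem.List.enumerate l 0).foldl (solveStepB N) (d, tot)).1.getD v 0
        = d.getD v 0 + ∑ j ∈ Finset.range l.length,
            (if l[j]? = some v then wB N j else 0))
    ∧ ((PySem.List.enumerate l 0).foldl (solveStepB N) (d, tot)).2
        = tot + ∑ j ∈ Finset.range l.length, wB N j := by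
  have hfun : solveStepB N = fun (st : PySem.Dict Int Int × Int) (p : Int × Int) =>
      (st.1.insert p.2 (st.1.getD p.2 0 + wB N p.1), st.2 + wB N p.1) :=
    funext fun st => funext fun p => stepB_eq N st p
  rw [hfun, PySem.List.foldl_prod_mk
    (f := fun (d : PySem.Dict Int Int) (p : Int × Int) => d.insert p.2 (d.getD p.2 0 + wB N p.1))
    (g := fun (acc : Int) (p : Int × Int) => acc + wB N p.1)]
  refine ⟨?_, ?_, ?_⟩
  · rw [PySem.Dict.keys_foldl_insert_key (key := fun p : Int × Int => p.2)
      (f := fun d p => d.getD p.2 0 + wB N p.1), PySem.List.map_snd_enumerate]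
  · intro v
    rw [getD_foldl_insert_add (fun p : Int × Int => p.2) (fun p : Int × Int => wB N p.1)
        (PySem.List.enumerate l 0) d v,
      enum_filter_sum (fun x => wB N x) v l 0]
    exact congrArg _ (Finset.sum_congr rfl fun j _ => by rw [zero_add])
  · rw [PySem.List.foldl_add (g := fun p : Int × Int => wB N p.1),
      enum_map_sum (fun x => wB N x) l 0]
    dsimp only
    exact congrArg (fun s => tot + s) (Finset.sum_congr rfl fun j _ => by rw [zero_add])

-- a Dict is determined by its key list and its values
lemma dict_eq_of_keys_getD (d d' : PySem.Dict Int Int) (hk : d.keys = d'.keys)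
    (hnd : d.keys.Nodup) (hv : ∀ v, d.getD v 0 = d'.getD v 0) : d = d' := by
  have hnd' : d'.keys.Nodup := hk ▸ hnd
  have hkm : d.items.map (fun p => p.1) = d'.items.map (fun p => p.1) := hk
  have hlen : d.items.length = d'.items.length := by
    have := congrArg List.length hkm
    simpa using this
  apply PySem.Dict.ext
  apply List.ext_getElem hlen
  intro j hj hj'
  have hfst : (d.items[j]).1 = (d'.items[j]).1 := by
    have h1 : (d.items.map (fun p => p.1))[j]? = (d'.items.map (fun p => p.1))[j]? := by
      rw [hkm]
    rw [List.getElem?_map, List.getElem?_map, List.getElem?_eq_getElem hj,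
      List.getElem?_eq_getElem hj'] at h1
    simpa using h1
  have hmem : d.items[j] ∈ d.items := List.getElem_mem hj
  have hmem' : d'.items[j] ∈ d'.items := List.getElem_mem hj'
  have hmem2 : ((d.items[j]).1, (d.items[j]).2) ∈ d.items := by
    simpa using hmem
  have hmem2' : ((d'.items[j]).1, (d'.items[j]).2) ∈ d'.items := by
    simpa using hmem'
  have hv1 : d.getD (d.items[j]).1 0 = (d.items[j]).2 :=
    PySem.Dict.getD_of_mem_items d hmem2 hnd (0:Int)
  have hv2 : d'.getD (d'.items[j]).1 0 = (d'.items[j]).2 :=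
    PySem.Dict.getD_of_mem_items d' hmem2' hnd' (0:Int)
  have hsnd : (d.items[j]).2 = (d'.items[j]).2 := by
    rw [← hv1, ← hv2, ← hfst, hv (d.items[j]).1]
  exact Prod.ext_iff.mpr ⟨hfst, hsnd⟩

lemma scan_eq (mp : PySem.Dict Int Int) (K : Int) :
    ∀ (keys : List Int) (till : Int), solveScanA mp K keys till = solveScanB mp K keys till := by
  intro keys
  induction keys with
  | nil => intro till; rfl
  | cons k rest ih =>
      intro till
      simp only [solveScanA, solveScanB]
      split <;> simp [ih]

lemma main_eq (A : List Int) (N : Int) (K : Int) : solve A N K = solve_alt A N K := by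
  by_cases h : 0 < N
  · have hN0 : 0 ≤ N := le_of_lt h
    set l := A.take N.toNat with hl
    have hm : l.length = min N.toNat A.length := by rw [hl, List.length_take]
    obtain ⟨hkeysA, hgetDA, htotA⟩ := loopA_spec A N N 1 PySem.Dict.empty 0
    obtain ⟨hkeysB, hgetDB, htotB⟩ := foldB_spec N l PySem.Dict.empty 0
    rw [if_pos h] at hkeysA
    have hsliceB : PySem.List.slice A none (some N) = l := PySem.List.slice_to A hN0
    have hsum : ∀ v j, j ∈ Finset.range l.length →
        (if l[j]? = some v then wB N (j : Int) else 0)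
          = (if A[j]? = some v then N * gsum 1 (tcount N j) else 0) := by
      intro v j hj
      simp only [Finset.mem_range, hm] at hj
      rw [List.getElem?_take_of_lt (by omega : j < N.toNat), wB_eq N hN0 j]
    have hd : (solveLoopA A N N 1 PySem.Dict.empty 0).1
        = ((PySem.List.enumerate l 0).foldl (solveStepB N) (PySem.Dict.empty, 0)).1 := by
      apply dict_eq_of_keys_getD
      · rw [hkeysA, hkeysB]
      · rw [hkeysA]
        exact PySem.Set.nodup_update _ _ (by simp [PySem.Dict.keys_empty])
      · intro v
        rw [hgetDA v, hgetDB v, hm]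
        exact congrArg _ (Finset.sum_congr rfl fun j hj =>
          ((hsum v j (by rwa [hm])).symm))
    have ht : (solveLoopA A N N 1 PySem.Dict.empty 0).2
        = ((PySem.List.enumerate l 0).foldl (solveStepB N) (PySem.Dict.empty, 0)).2 := by
      rw [htotA, htotB, hm]
      refine congrArg _ (Finset.sum_congr rfl fun j hj => ?_)
      rw [wB_eq N hN0 j]
    simp only [solve, solve_alt, if_pos h, hsliceB, hd, ht]
    split
    · rfl
    · exact scan_eq _ _ _ _
  · simp only [solve, solve_alt, if_neg h]
    rw [solveLoopA, dif_neg h]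
    split
    · rfl
    · exact scan_eq _ _ _ _

-- ===== VERDICT (by name: the statement is the Claim_ definition above) =====
theorem solve_spec : Claim_equal_solve := by
  intro A N K _ _
  unfold Spec_solve
  exact main_eq A N K
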